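-- pv_equiv track=rewrite | github.com/KirilTan/Algorithms-with-Python-11-2024 | 08_exam/01.py | find_valid_subsets
-- ===== SOURCE A (Python) =====
-- from itertools import combinations
--
-- def find_valid_subsets(nums, target):
--     nums.sort()  # Sort the input list for ordered subsets
--     result = []
--
--     for size in range(1, len(nums) + 1):
--         for subset in combinations(nums, size):
--             if sum(subset) <= target:
--                 result.append(list(subset))
--
--     return result
-- ===== SOURCE B (Python) =====
-- def find_valid_subsets(nums, target):
--     nums.sort()  # same in-place sort as A (same side effect)
--     n = len(nums)
--     buckets = [[] for _ in range(n + 1)]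
--
--     def dfs(start, cur, s):
--         for i in range(start, n):
--             sub = cur + [nums[i]]
--             s2 = s + nums[i]
--             if s2 <= target:
--                 buckets[len(sub)].append(sub)
--             dfs(i + 1, sub, s2)
--
--     dfs(0, [], 0)
--     result = []
--     for b in buckets[1:]:
--         result.extend(b)
--     return result
-- ===== Notes on version B (the rewrite author's own statement) =====
-- stated objective: alternative
-- what changed: A loops over sizes 1..n and enumerates combinations(nums, size) per size; B runs one recursive DFS over increasing indices that visits every subset once, buckets passing subsets by length, and flattens the buckets, so the sorted list is traversed once by one recursion instead of n separate combination enumerations.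
import Mathlib
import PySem

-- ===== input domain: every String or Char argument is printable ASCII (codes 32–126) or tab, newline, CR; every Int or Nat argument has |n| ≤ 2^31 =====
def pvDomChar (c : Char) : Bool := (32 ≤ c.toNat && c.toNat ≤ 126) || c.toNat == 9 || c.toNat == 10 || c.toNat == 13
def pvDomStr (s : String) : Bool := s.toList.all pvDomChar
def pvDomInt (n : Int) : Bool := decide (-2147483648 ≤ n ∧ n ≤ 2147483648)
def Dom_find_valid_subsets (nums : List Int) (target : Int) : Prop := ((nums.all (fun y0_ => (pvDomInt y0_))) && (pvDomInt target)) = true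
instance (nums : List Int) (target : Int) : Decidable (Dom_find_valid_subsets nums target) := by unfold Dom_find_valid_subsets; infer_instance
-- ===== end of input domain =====

-- B replaces A's per-size combinations loops by a single DFS that buckets subsets by length and
-- flattens the buckets (alternative decomposition, same cost class). Both A and B sort nums in
-- place (same side effect); the equivalence proved here is about the return value.

-- ===== PORT A =====
-- itertools.combinations(xs, k) in its documented emission order
def combsA : Nat → List Int → List (List Int)
  | 0, _ => [[]]
  | _ + 1, [] => []
  | k + 1, x :: xs => ((combsA k xs).map (fun e => x :: e)) ++ combsA (k + 1) xs

def find_valid_subsets (nums : List Int) (target : Int) : List (List Int) :=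
  let sorted := PySem.List.sorted nums (fun x => x) false   -- nums.sort()
  (PySem.List.pyRange 1 ((sorted.length : Int) + 1) 1).foldl
    (fun result size =>
      (combsA size.toNat sorted).foldl
        (fun result subset => if subset.sum ≤ target then result ++ [subset] else result)
        result)
    []

-- ===== PORT B =====
-- dfs(start, cur, s): the 'for i in range(start, n)' loop over the remaining suffix
def dfsB (target : Int) : List Int → List Int → Int → List (List (List Int)) → List (List (List Int))
  | [], _, _, buckets => buckets
  | x :: rest, cur, s, buckets =>
      let sub := cur ++ [x]
      let s2 := s + x
      let b1 := if s2 ≤ target then buckets.modify sub.length (fun bj => bj ++ [sub]) else buckets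
      dfsB target rest cur s (dfsB target rest sub s2 b1)

def find_valid_subsets_alt (nums : List Int) (target : Int) : List (List Int) :=
  let sorted := PySem.List.sorted nums (fun x => x) false   -- nums.sort()
  let n := sorted.length
  let buckets := List.replicate (n + 1) ([] : List (List Int))
  let final := dfsB target sorted [] 0 buckets
  (final.drop 1).foldl (fun result b => result ++ b) []

-- ===== PRECONDITION & SPEC =====
def Spec_find_valid_subsets (nums : List Int) (target : Int) (out : List (List Int)) : Prop := out = find_valid_subsets_alt nums target
instance (nums : List Int) (target : Int) (out : List (List Int)) : Decidable (Spec_find_valid_subsets nums target out) := by unfold Spec_find_valid_subsets; infer_instance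

-- ===== CLAIM (what is proved, stated in full; the proofs are below) =====
def Claim_equal_find_valid_subsets : Prop := ∀ (nums : List Int) (target : Int), Dom_find_valid_subsets nums target → Spec_find_valid_subsets nums target (find_valid_subsets nums target)

-- ===== LEMMAS AND PROOFS =====

-- DFS emission order of all non-empty subsets of xs (by strictly increasing index)
def Evis : List Int → List (List Int)
  | [] => []
  | x :: xs => ([x] :: (Evis xs).map (fun e => x :: e)) ++ Evis xs

def stepB (target : Int) (buckets : List (List (List Int))) (sub : List Int) : List (List (List Int)) :=
  if sub.sum ≤ target then buckets.modify sub.length (fun bj => bj ++ [sub]) else buckets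

def pbkt (target : Int) (j : Nat) (sub : List Int) : Bool :=
  decide (sub.sum ≤ target) && (sub.length == j)

theorem Evis_ne_nil {xs : List Int} {sub : List Int} (h : sub ∈ Evis xs) : sub ≠ [] := by
  induction xs with
  | nil => simp [Evis] at h
  | cons x xs ih =>
    simp only [Evis, List.mem_append, List.mem_cons, List.mem_map] at h
    rcases h with (h | ⟨e, _, rfl⟩) | h
    · subst h; simp
    · simp
    · exact ih h

theorem filter_Evis (xs : List Int) (k : Nat) :
    (Evis xs).filter (fun sub => sub.length == k + 1) = combsA (k + 1) xs := by
  induction xs generalizing k with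
  | nil => simp [Evis, combsA]
  | cons x xs ih =>
    simp only [Evis, List.filter_append, List.filter_cons, List.filter_map]
    cases k with
    | zero =>
      simp only [Function.comp_def]
      simp [combsA, ih 0]
      intro a ha
      exact Evis_ne_nil ha
    | succ k' =>
      have hx : ([x].length == k' + 1 + 1) = false := by simp
      simp only [hx, Function.comp_def]
      have : ((Evis xs).filter fun e => (x :: e).length == k' + 1 + 1)
           = (Evis xs).filter (fun e => e.length == k' + 1) := by
        apply List.filter_congr; intro e _; simp
      rw [this, ih, ih]
      simp [combsA]

theorem dfsB_eq_foldl (target : Int) (rem : List Int) :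
    ∀ (cur : List Int) (s : Int) (b : List (List (List Int))), s = cur.sum →
    dfsB target rem cur s b = ((Evis rem).map (fun e => cur ++ e)).foldl (stepB target) b := by
  induction rem with
  | nil => intro cur s b _; simp [dfsB, Evis]
  | cons x rest ih =>
    intro cur s b hs
    have hsum : s + x = (cur ++ [x]).sum := by simp [hs]
    have hstep : (if s + x ≤ target then b.modify (cur ++ [x]).length (fun bj => bj ++ [cur ++ [x]]) else b)
        = stepB target b (cur ++ [x]) := by
      simp [stepB, hsum]
    simp only [dfsB, hstep]
    rw [ih (cur ++ [x]) (s + x) _ hsum, ih cur s _ hs]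
    simp only [Evis, List.map_append, List.map_cons, List.map_map, List.foldl_append, List.foldl_cons]
    have hmapeq : (Evis rest).map ((fun e => cur ++ e) ∘ (fun e => x :: e))
        = (Evis rest).map (fun e => (cur ++ [x]) ++ e) := by
      simp [Function.comp_def]
    rw [hmapeq]

theorem foldl_stepB_getElem (target : Int) (L : List (List Int)) :
    ∀ (b : List (List (List Int))) (j : Nat) (hj : j < b.length),
    (L.foldl (stepB target) b).length = b.length ∧
    ∀ (h' : j < (L.foldl (stepB target) b).length),
    (L.foldl (stepB target) b)[j] = b[j] ++ L.filter (pbkt target j) := by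
  induction L with
  | nil => intro b j hj; exact ⟨rfl, fun _ => by simp⟩
  | cons sub L ih =>
    intro b j hj
    have hlen : (stepB target b sub).length = b.length := by
      unfold stepB; split <;> simp [List.length_modify]
    have hj' : j < (stepB target b sub).length := by omega
    obtain ⟨hl, hg⟩ := ih (stepB target b sub) j hj'
    refine ⟨by simp only [List.foldl_cons]; omega, ?_⟩
    intro h'
    simp only [List.foldl_cons]
    rw [hg (by simpa [List.foldl_cons] using h')]
    have hsub : (stepB target b sub)[j]'hj' ++ L.filter (pbkt target j)
        = b[j] ++ (sub :: L).filter (pbkt target j) := by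
      unfold stepB
      by_cases hle : sub.sum ≤ target
      · simp only [if_pos hle]
        by_cases hlj : sub.length = j
        · have : pbkt target j sub = true := by simp [pbkt, hle, hlj]
          rw [List.getElem_modify, if_pos hlj]
          simp [this, List.append_assoc]
        · have : pbkt target j sub = false := by simp [pbkt, hlj]
          rw [List.getElem_modify, if_neg hlj]
          simp [this]
      · have : pbkt target j sub = false := by simp [pbkt, hle]
        simp [if_neg hle, this]
    exact hsub

theorem dfsB_buckets (target : Int) (xs : List Int) (n : Nat) (hn : n = xs.length) :
    dfsB target xs [] 0 (List.replicate (n + 1) ([] : List (List Int)))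
      = (List.range (n + 1)).map (fun j => (Evis xs).filter (pbkt target j)) := by
  rw [dfsB_eq_foldl target xs [] 0 _ (by simp)]
  have hmap : (Evis xs).map (fun e => ([] : List Int) ++ e) = Evis xs := by simp
  rw [hmap]
  apply List.ext_getElem
  · have := (foldl_stepB_getElem target (Evis xs) (List.replicate (n + 1) ([] : List (List Int))) 0 (by simp)).1
    simp_all
  · intro j h1 h2
    have hj : j < (List.replicate (n + 1) ([] : List (List Int))).length := by simp_all
    obtain ⟨_, hg⟩ := foldl_stepB_getElem target (Evis xs) (List.replicate (n + 1) ([] : List (List Int))) j hj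
    rw [hg h1]
    simp_all

theorem foldl_append_id {α : Type} (L : List (List α)) (acc : List α) :
    L.foldl (fun result b => result ++ b) acc = acc ++ L.flatten := by
  rw [List.flatten_eq_flatMap]
  exact PySem.List.foldl_append_eq_flatMap id L acc

theorem bridge_filter (target : Int) (xs : List Int) (k : Nat) :
    (Evis xs).filter (pbkt target (k + 1))
      = (combsA (k + 1) xs).filter (fun s => decide (s.sum ≤ target)) := by
  rw [← filter_Evis xs k, List.filter_filter]
  apply List.filter_congr
  intro e _
  simp [pbkt]

-- ===== VERDICT (by name: the statement is the Claim_ definition above) =====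
theorem find_valid_subsets_spec : Claim_equal_find_valid_subsets := by
  intro nums target _
  unfold Spec_find_valid_subsets
  simp only [find_valid_subsets, find_valid_subsets_alt]
  set sorted := PySem.List.sorted nums (fun x => x) false with hsorted
  set n := sorted.length with hn
  -- B side
  rw [dfsB_buckets target sorted n rfl]
  rw [List.range_succ_eq_map, List.drop_one]
  simp only [List.map_cons, List.tail_cons, List.map_map]
  rw [foldl_append_id]
  simp only [List.nil_append, List.flatten_eq_flatMap, List.flatMap_map]
  -- A side
  have hinner : (fun (result : List (List Int)) (size : Int) =>
      (combsA size.toNat sorted).foldl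
        (fun result subset => if subset.sum ≤ target then result ++ [subset] else result) result)
      = (fun result size => result ++ (combsA size.toNat sorted).filter (fun s => decide (s.sum ≤ target))) := by
    funext r k
    exact PySem.List.foldl_append_ite_eq_filter _ _ r
  rw [hinner, PySem.List.foldl_append_eq_flatMap]
  rw [PySem.List.pyRange_one]
  rw [List.flatMap_map]
  simp only [List.nil_append]
  have hrange : ((n : Int) + 1 - 1).toNat = n := by omega
  rw [hrange]
  have hfun : (fun (a : Nat) => id (((fun j => List.filter (pbkt target j) (Evis sorted)) ∘ Nat.succ) a))
      = (fun (a : Nat) => List.filter (fun s => decide (s.sum ≤ target)) (combsA ((1 : Int) + (a : Int)).toNat sorted)) := by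
    funext k
    have h1 : ((1 : Int) + (k : Int)).toNat = k + 1 := by omega
    simp [h1, bridge_filter]
  rw [hfun]
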